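-- pv_equiv track=rewrite | github.com/Lokam-AI/lokamspace | server/scripts/fix_parameter_order.py | reorder_parameters
-- ===== SOURCE A (Python) =====
-- from typing import List, Tuple
--
-- def reorder_parameters(params: List[Tuple[str, str, bool]]) -> List[Tuple[str, str, bool]]:
--     """
--     Reorder parameters so that parameters with default values come after those without.
--
--     Args:
--         params: List of parameter tuples (name, type, has_default)
--
--     Returns:
--         Reordered list of parameter tuples
--     """
--     # Split into parameters with and without default values
--     no_default = [p for p in params if not p[2]]
--     with_default = [p for p in params if p[2]]
--
--     # Special case: move db: AsyncSession to the front if it exists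
--     db_param = None
--     for i, param in enumerate(no_default):
--         if param[0] == "db" and "AsyncSession" in param[1]:
--             db_param = no_default.pop(i)
--             break
--
--     # Reorder with db first, then other required params, then params with defaults
--     result = []
--     if db_param:
--         result.append(db_param)
--     result.extend(no_default)
--     result.extend(with_default)
--
--     return result
-- ===== SOURCE B (Python) =====
-- from typing import List, Tuple
--
-- def reorder_parameters(params: List[Tuple[str, str, bool]]) -> List[Tuple[str, str, bool]]:
--     """Single pass: route each param to db slot / required / defaulted; concatenate."""
--     db_param = None
--     found = False
--     required = []
--     with_default = []
--     for p in params: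
--         if p[2]:
--             with_default.append(p)
--         elif not found and p[0] == "db" and "AsyncSession" in p[1]:
--             db_param = p
--             found = True
--         else:
--             required.append(p)
--     head = [db_param] if found else []
--     return head + required + with_default
-- ===== Notes on version B (the rewrite author's own statement) =====
-- stated objective: simpler
-- what changed: Replaced A's two list comprehensions plus a separate enumerate/pop scan with a single routing pass that dispatches each param to the db slot, required list, or defaulted list.
import Mathlib
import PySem

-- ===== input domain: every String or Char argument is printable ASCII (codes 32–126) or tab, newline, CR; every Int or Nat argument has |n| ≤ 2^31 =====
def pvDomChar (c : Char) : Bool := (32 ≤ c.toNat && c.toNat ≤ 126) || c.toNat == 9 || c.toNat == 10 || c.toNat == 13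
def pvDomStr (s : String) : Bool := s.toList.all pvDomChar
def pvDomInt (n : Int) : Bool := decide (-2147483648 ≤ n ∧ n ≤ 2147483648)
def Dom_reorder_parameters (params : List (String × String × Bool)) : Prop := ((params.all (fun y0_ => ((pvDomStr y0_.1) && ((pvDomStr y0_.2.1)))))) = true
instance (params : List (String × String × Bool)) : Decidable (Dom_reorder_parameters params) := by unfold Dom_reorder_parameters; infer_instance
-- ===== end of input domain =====

-- B replaces A's two comprehensions plus a separate scan-and-pop with one routing pass over params (objective: simpler).

-- shared predicate: param[0] == "db" and "AsyncSession" in param[1]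
def pvIsDb (p : String × String × Bool) : Bool :=
  p.1 == "db" && PySem.Str.isIn "AsyncSession" p.2.1

-- ===== PORT A =====
-- the 'for i, param in enumerate(no_default): … pop(i); break' loop: first match removed
def pvFindPop (xs : List (String × String × Bool)) :
    Option (String × String × Bool) × List (String × String × Bool) :=
  match xs with
  | [] => (none, [])
  | p :: rest =>
      if pvIsDb p then (some p, rest)
      else
        let (d, r) := pvFindPop rest
        (d, p :: r)

def reorder_parameters (params : List (String × String × Bool)) : List (String × String × Bool) :=
  let no_default := params.filter (fun p => !p.2.2)
  let with_default := params.filter (fun p => p.2.2)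
  let fp := pvFindPop no_default
  -- 'if db_param:' — db_param is None or a 3-tuple, the latter always truthy
  (match fp.1 with | some d => [d] | none => []) ++ fp.2 ++ with_default

-- ===== PORT B =====
-- one pass; the state is (db_param with .isSome as the found flag, required, with_default)
def pvStep (st : Option (String × String × Bool) × List (String × String × Bool) × List (String × String × Bool))
    (p : String × String × Bool) :
    Option (String × String × Bool) × List (String × String × Bool) × List (String × String × Bool) :=
  if p.2.2 then (st.1, st.2.1, st.2.2 ++ [p])
  else if st.1.isNone && pvIsDb p then (some p, st.2.1, st.2.2)
  else (st.1, st.2.1 ++ [p], st.2.2)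

def reorder_parameters_alt (params : List (String × String × Bool)) : List (String × String × Bool) :=
  let st := params.foldl pvStep (none, [], [])
  (match st.1 with | some d => [d] | none => []) ++ st.2.1 ++ st.2.2

-- ===== PRECONDITION & SPEC =====
def Spec_reorder_parameters (params : List (String × String × Bool)) (out : List (String × String × Bool)) : Prop := out = reorder_parameters_alt params
instance (params : List (String × String × Bool)) (out : List (String × String × Bool)) : Decidable (Spec_reorder_parameters params out) := by unfold Spec_reorder_parameters; infer_instance

-- ===== CLAIM (what is proved, stated in full; the proofs are below) =====
def Claim_equal_reorder_parameters : Prop := ∀ (params : List (String × String × Bool)), Dom_reorder_parameters params → Spec_reorder_parameters params (reorder_parameters params)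

-- ===== LEMMAS AND PROOFS =====

theorem pvFoldl_some (params : List (String × String × Bool))
    (d : String × String × Bool) (req wd : List (String × String × Bool)) :
    params.foldl pvStep (some d, req, wd) =
      (some d, req ++ params.filter (fun p => !p.2.2), wd ++ params.filter (fun p => p.2.2)) := by
  induction params generalizing req wd with
  | nil => simp
  | cons p rest ih =>
      by_cases hp : p.2.2 <;>
        simp [pvStep, hp, ih, List.append_assoc]

theorem pvFoldl_none (params : List (String × String × Bool))
    (req wd : List (String × String × Bool)) :
    params.foldl pvStep (none, req, wd) =
      ((pvFindPop (params.filter (fun p => !p.2.2))).1,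
       req ++ (pvFindPop (params.filter (fun p => !p.2.2))).2,
       wd ++ params.filter (fun p => p.2.2)) := by
  induction params generalizing req wd with
  | nil => simp [pvFindPop]
  | cons p rest ih =>
      by_cases hp : p.2.2
      · simp [pvStep, hp, ih, List.append_assoc]
      · by_cases hd : pvIsDb p
        · simp [pvStep, hp, hd, pvFindPop, pvFoldl_some]
        · simp [pvStep, hp, hd, pvFindPop, ih, List.append_assoc]

-- ===== VERDICT (by name: the statement is the Claim_ definition above) =====
theorem reorder_parameters_spec : Claim_equal_reorder_parameters := by
  intro params _
  unfold Spec_reorder_parameters reorder_parameters reorder_parameters_alt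
  simp [pvFoldl_none]
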